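-- pv_equiv track=rewrite | github.com/Q-transmon-xmon/EDA-Q | routing/Flipchip_IBM/control_lines.py | find_extreme_points
-- ===== SOURCE A (Python) =====
-- def find_extreme_points(points):
--     """
--     Find the extreme points in the given point set.
--
--     Args:
--         points: List containing multiple coordinate points.
--
--     Returns:
--         min_x_points, max_x_points, min_y_points, max_y_points: Four lists containing the points with the minimum and maximum x and y coordinates.
--     """
--     if not points:
--         return [], [], [], []
--     min_x_points = []
--     max_x_points = []
--     min_y_points = []
--     max_y_points = []
--
--     for point in points:
--         y = point[1]
--         row_points = [p for p in points if p[1] == y]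
--         min_x = float('inf')  # Initial value set to positive infinity
--         max_x = float('-inf')  # Initial value set to negative infinity
--
--         for row_point in row_points:
--             x = row_point[0]  # Get the x-coordinate
--             if x < min_x:
--                 min_x = x
--             if x > max_x:
--                 max_x = x
--         min_pos = [p for p in row_points if p[0] == min_x]
--         max_pos = [p for p in row_points if p[0] == max_x]
--         min_x_points.append(min_pos[0])
--         max_x_points.append(max_pos[0])
--
--     for point in points:
--         x = point[0]
--         column_points = [p for p in points if p[0] == x]
--         min_y = float('inf')  # Initial value set to positive infinity
--         max_y = float('-inf')  # Initial value set to negative infinity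
--
--         for column_point in column_points:
--             y = column_point[1]  # Get the y-coordinate
--             if y < min_y:
--                 min_y = y
--             if y > max_y:
--                 max_y = y
--         min_pos = [p for p in column_points if p[1] == min_y]
--         max_pos = [p for p in column_points if p[1] == max_y]
--         min_y_points.append(min_pos[0])
--         max_y_points.append(max_pos[0])
--
--     min_x_points = list(set(min_x_points))
--     max_x_points = list(set(max_x_points))
--     min_y_points = list(set(min_y_points))
--     max_y_points = list(set(max_y_points))
--
--     min_x_points = sorted(min_x_points, key=lambda x: x[1])
--     max_x_points = sorted(max_x_points, key=lambda x: x[1])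
--     min_y_points = sorted(min_y_points, key=lambda x: x[0])
--     max_y_points = sorted(max_y_points, key=lambda x: x[0])
--
--     return min_x_points, max_x_points, min_y_points, max_y_points
-- ===== SOURCE B (Python) =====
-- def find_extreme_points(points):
--     """One-pass grouping: per-row (same y) first min/max-x point and per-column
--     (same x) first min/max-y point tracked in dicts, then sorted by group key."""
--     rows_min = {}
--     rows_max = {}
--     cols_min = {}
--     cols_max = {}
--     for p in points:
--         x, y = p[0], p[1]
--         r = rows_min.get(y)
--         if r is None or x < r[0]:
--             rows_min[y] = p
--         r = rows_max.get(y)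
--         if r is None or x > r[0]:
--             rows_max[y] = p
--         c = cols_min.get(x)
--         if c is None or y < c[1]:
--             cols_min[x] = p
--         c = cols_max.get(x)
--         if c is None or y > c[1]:
--             cols_max[x] = p
--     return (sorted(rows_min.values(), key=lambda p: p[1]),
--             sorted(rows_max.values(), key=lambda p: p[1]),
--             sorted(cols_min.values(), key=lambda p: p[0]),
--             sorted(cols_max.values(), key=lambda p: p[0]))
-- ===== Notes on version B (the rewrite author's own statement) =====
-- stated objective: faster
-- what changed: Replaced A's quadratic per-point rescans (filtering the whole list for each point's row/column and re-folding min/max) by a single pass that keeps the first min/max representative per row and per column in four dictionaries, then sorts the dictionary values by the group key.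
import Mathlib
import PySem

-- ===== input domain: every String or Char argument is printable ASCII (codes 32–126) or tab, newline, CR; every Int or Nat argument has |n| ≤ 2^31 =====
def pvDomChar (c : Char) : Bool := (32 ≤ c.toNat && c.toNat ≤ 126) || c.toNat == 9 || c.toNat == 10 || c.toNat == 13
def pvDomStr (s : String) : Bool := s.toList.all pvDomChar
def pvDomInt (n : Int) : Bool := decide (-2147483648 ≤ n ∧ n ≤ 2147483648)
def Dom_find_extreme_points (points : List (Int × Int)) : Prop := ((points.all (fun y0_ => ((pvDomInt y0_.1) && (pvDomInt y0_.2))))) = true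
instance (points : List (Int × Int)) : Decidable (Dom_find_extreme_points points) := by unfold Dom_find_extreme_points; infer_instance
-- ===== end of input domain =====

-- B replaces A's quadratic per-point row/column rescans by ONE pass that keeps
-- per-row and per-column min/max representatives in dictionaries, then sorts them.
-- A's `list(set(...))` is ported as PySem.Set.ofList + sorted: each of those sets
-- holds exactly one representative per sort-key value, so the sorted result does
-- not depend on Python's set iteration order.

-- ===== PORT A =====
-- `headD (0, 0)` is a total guard for `min_pos[0]` / `max_pos[0]`: the row/column
-- always contains `point` itself, so those filtered lists are never empty.
def find_extreme_points (points : List (Int × Int)) :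
    (List (Int × Int)) × (List (Int × Int)) × (List (Int × Int)) × (List (Int × Int)) :=
  if points = [] then ([], [], [], []) else
  let pass1 := points.foldl (fun (acc : List (Int × Int) × List (Int × Int)) point =>
    let row := points.filter (fun p => p.2 == point.2)
    let mm := row.foldl (fun (s : Option Int × Option Int) rp =>
        (match s.1 with | none => some rp.1 | some m => if rp.1 < m then some rp.1 else some m,
         match s.2 with | none => some rp.1 | some m => if rp.1 > m then some rp.1 else some m))
      (none, none)
    (acc.1 ++ [(row.filter (fun p => some p.1 == mm.1)).headD (0, 0)],
     acc.2 ++ [(row.filter (fun p => some p.1 == mm.2)).headD (0, 0)])) ([], [])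
  let pass2 := points.foldl (fun (acc : List (Int × Int) × List (Int × Int)) point =>
    let col := points.filter (fun p => p.1 == point.1)
    let mm := col.foldl (fun (s : Option Int × Option Int) cp =>
        (match s.1 with | none => some cp.2 | some m => if cp.2 < m then some cp.2 else some m,
         match s.2 with | none => some cp.2 | some m => if cp.2 > m then some cp.2 else some m))
      (none, none)
    (acc.1 ++ [(col.filter (fun p => some p.2 == mm.1)).headD (0, 0)],
     acc.2 ++ [(col.filter (fun p => some p.2 == mm.2)).headD (0, 0)])) ([], [])
  (PySem.List.sorted (PySem.Set.ofList pass1.1) (fun p => p.2) false,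
   PySem.List.sorted (PySem.Set.ofList pass1.2) (fun p => p.2) false,
   PySem.List.sorted (PySem.Set.ofList pass2.1) (fun p => p.1) false,
   PySem.List.sorted (PySem.Set.ofList pass2.2) (fun p => p.1) false)

-- ===== PORT B =====
def find_extreme_points_alt (points : List (Int × Int)) :
    (List (Int × Int)) × (List (Int × Int)) × (List (Int × Int)) × (List (Int × Int)) :=
  let ds := points.foldl
    (fun (ds : PySem.Dict Int (Int × Int) × PySem.Dict Int (Int × Int) ×
               PySem.Dict Int (Int × Int) × PySem.Dict Int (Int × Int)) p =>
      (match ds.1.get? p.2 with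
       | none => ds.1.insert p.2 p
       | some r => if p.1 < r.1 then ds.1.insert p.2 p else ds.1,
       match ds.2.1.get? p.2 with
       | none => ds.2.1.insert p.2 p
       | some r => if p.1 > r.1 then ds.2.1.insert p.2 p else ds.2.1,
       match ds.2.2.1.get? p.1 with
       | none => ds.2.2.1.insert p.1 p
       | some r => if p.2 < r.2 then ds.2.2.1.insert p.1 p else ds.2.2.1,
       match ds.2.2.2.get? p.1 with
       | none => ds.2.2.2.insert p.1 p
       | some r => if p.2 > r.2 then ds.2.2.2.insert p.1 p else ds.2.2.2))
    (PySem.Dict.empty, PySem.Dict.empty, PySem.Dict.empty, PySem.Dict.empty)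
  (PySem.List.sorted ds.1.values (fun p => p.2) false,
   PySem.List.sorted ds.2.1.values (fun p => p.2) false,
   PySem.List.sorted ds.2.2.1.values (fun p => p.1) false,
   PySem.List.sorted ds.2.2.2.values (fun p => p.1) false)

-- ===== PRECONDITION & SPEC =====
def Spec_find_extreme_points (points : List (Int × Int)) (out : (List (Int × Int)) × (List (Int × Int)) × (List (Int × Int)) × (List (Int × Int))) : Prop := out = find_extreme_points_alt points
instance (points : List (Int × Int)) (out : (List (Int × Int)) × (List (Int × Int)) × (List (Int × Int)) × (List (Int × Int))) : Decidable (Spec_find_extreme_points points out) := by unfold Spec_find_extreme_points; infer_instance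

-- ===== CLAIM (what is proved, stated in full; the proofs are below) =====
def Claim_equal_find_extreme_points : Prop := ∀ (points : List (Int × Int)), Dom_find_extreme_points points → Spec_find_extreme_points points (find_extreme_points points)

-- ===== LEMMAS AND PROOFS =====

-- Generic machinery: everything is parametrised by a strict comparison `lt`, the
-- grouping key `key` (the shared coordinate of a row/column) and the compared
-- value `val` (the other coordinate); the four output components are instances.

-- one step of A's inner min/max fold (on the value only)
def pvMinStep (lt : Int → Int → Prop) [DecidableRel lt] (val : Int × Int → Int)
    (o : Option Int) (p : Int × Int) : Option Int :=
  match o with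
  | none => some (val p)
  | some m => if lt (val p) m then some (val p) else some m

-- one step of B's "keep the first strictly-better representative" update
def pvUpd (lt : Int → Int → Prop) [DecidableRel lt] (val : Int × Int → Int)
    (o : Option (Int × Int)) (p : Int × Int) : Option (Int × Int) :=
  match o with
  | none => some p
  | some r => if lt (val p) (val r) then some p else some r

-- the first strictly-extremal point of the group of `y`, scanning left to right
def pvBest (lt : Int → Int → Prop) [DecidableRel lt] (key val : Int × Int → Int)
    (l : List (Int × Int)) (y : Int) : Option (Int × Int) :=
  l.foldl (fun o p => if key p == y then pvUpd lt val o p else o) none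

-- B's dictionary loop, one component
def pvDictB (lt : Int → Int → Prop) [DecidableRel lt] (key val : Int × Int → Int)
    (l : List (Int × Int)) : PySem.Dict Int (Int × Int) :=
  l.foldl (fun d p =>
    match d.get? (key p) with
    | none => d.insert (key p) p
    | some r => if lt (val p) (val r) then d.insert (key p) p else d) PySem.Dict.empty

lemma pvScan (lt : Int → Int → Prop) [DecidableRel lt] (val : Int × Int → Int)
    (hirr : ∀ a, ¬ lt a a) (htr : ∀ a b c, ¬ lt a c → lt b c → ¬ lt a b)
    (r : List (Int × Int)) :
    (r = [] ∧ r.foldl (pvUpd lt val) none = none ∧ r.foldl (pvMinStep lt val) none = none) ∨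
    (∃ b, r.foldl (pvUpd lt val) none = some b ∧
      r.foldl (pvMinStep lt val) none = some (val b) ∧
      (r.filter (fun p => some (val p) == some (val b))).head? = some b ∧
      ∀ p ∈ r, ¬ lt (val p) (val b)) := by
  induction r using List.reverseRecOn with
  | nil => exact Or.inl ⟨rfl, rfl, rfl⟩
  | append_singleton l q ih =>
    right
    rcases ih with ⟨hnil, -, -⟩ | ⟨b, hu, hm, hh, hmin⟩
    · subst hnil
      refine ⟨q, ?_, ?_, ?_, ?_⟩
      · rfl
      · rfl
      · rw [List.nil_append, List.filter_cons_of_pos (by simp)]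
        rfl
      · intro p hp; simp at hp; subst hp; exact hirr _
    · by_cases hq : lt (val q) (val b)
      · refine ⟨q, ?_, ?_, ?_, ?_⟩
        · simp [List.foldl_append, hu, pvUpd, hq]
        · simp [List.foldl_append, hm, pvMinStep, hq]
        · have hfl : l.filter (fun p => some (val p) == some (val q)) = [] := by
            rw [List.filter_eq_nil_iff]
            intro p hp hbeq
            simp only [beq_iff_eq, Option.some.injEq] at hbeq
            exact (hmin p hp) (by rw [hbeq]; exact hq)
          rw [List.filter_append, hfl, List.nil_append,
              List.filter_cons_of_pos (by simp)]
          rfl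
        · intro p hp
          rcases List.mem_append.mp hp with hp | hp
          · exact htr (val p) (val q) (val b) (hmin p hp) hq
          · simp at hp; subst hp; exact hirr _
      · refine ⟨b, ?_, ?_, ?_, ?_⟩
        · simp [List.foldl_append, hu, pvUpd, hq]
        · simp [List.foldl_append, hm, pvMinStep, hq]
        · rw [List.filter_append]
          cases hfl : l.filter (fun p => some (val p) == some (val b)) with
          | nil => rw [hfl] at hh; exact absurd hh (by simp)
          | cons a t =>
            rw [hfl] at hh
            rw [List.cons_append]
            exact hh
        · intro p hp
          rcases List.mem_append.mp hp with hp | hp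
          · exact hmin p hp
          · simp at hp; subst hp; exact hq

-- A's per-point computation (filter the group, fold the extremum, take the first
-- point achieving it) equals the getD of the single scan `pvBest`.
lemma pvRow (lt : Int → Int → Prop) [DecidableRel lt] (key val : Int × Int → Int)
    (hirr : ∀ a, ¬ lt a a) (htr : ∀ a b c, ¬ lt a c → lt b c → ¬ lt a b)
    (l : List (Int × Int)) (y : Int) :
    ((l.filter (fun p => key p == y)).filter
        (fun p => some (val p) == (l.filter (fun p => key p == y)).foldl (pvMinStep lt val) none)).headD (0, 0)
      = (pvBest lt key val l y).getD (0, 0) := by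
  have hbest : pvBest lt key val l y = (l.filter (fun p => key p == y)).foldl (pvUpd lt val) none := by
    rw [pvBest, List.foldl_filter]
  rcases pvScan lt val hirr htr (l.filter (fun p => key p == y)) with
    ⟨h0, -, -⟩ | ⟨b, hu, hm, hh, -⟩
  · rw [h0, hbest, h0]; rfl
  · rw [hm, hbest, hu]
    cases hfl : (l.filter (fun p => key p == y)).filter (fun p => some (val p) == some (val b)) with
    | nil => rw [hfl] at hh; exact absurd hh (by simp)
    | cons a t =>
      rw [hfl] at hh
      simp only [List.head?_cons, Option.some.injEq] at hh
      simp [hh]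

lemma pvDict_get? (lt : Int → Int → Prop) [DecidableRel lt] (key val : Int × Int → Int)
    (l : List (Int × Int)) (y : Int) :
    (pvDictB lt key val l).get? y = pvBest lt key val l y := by
  rw [pvDictB, pvBest]
  induction l using List.reverseRecOn with
  | nil => rfl
  | append_singleton l q ih =>
    rw [List.foldl_append, List.foldl_append, List.foldl_cons, List.foldl_nil,
        List.foldl_cons, List.foldl_nil]
    by_cases hk : key q = y
    · subst hk
      cases hg : (List.foldl _ PySem.Dict.empty l).get? (key q) with
      | none =>
        have ihb : List.foldl (fun o p => if (key p == key q) = true then pvUpd lt val o p else o) none l = none := by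
          rw [← ih]; exact hg
        simp only [ihb, beq_self_eq_true, if_true]
        rw [PySem.Dict.get?_insert, if_pos rfl]
        rfl
      | some r =>
        have ihb : List.foldl (fun o p => if (key p == key q) = true then pvUpd lt val o p else o) none l = some r := by
          rw [← ih]; exact hg
        simp only [ihb, beq_self_eq_true, if_true]
        by_cases hlt : lt (val q) (val r)
        · rw [if_pos hlt, PySem.Dict.get?_insert, if_pos rfl]
          simp [pvUpd, hlt]
        · rw [if_neg hlt, hg]
          simp [pvUpd, hlt]
    · have hk' : (key q == y) = false := by simp [hk]
      simp only [hk', Bool.false_eq_true, if_false]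
      cases hg : (List.foldl _ PySem.Dict.empty l).get? (key q) with
      | none => dsimp only; rw [PySem.Dict.get?_insert, if_neg (Ne.symm hk)]; exact ih
      | some r =>
        dsimp only
        by_cases hlt : lt (val q) (val r)
        · rw [if_pos hlt, PySem.Dict.get?_insert, if_neg (Ne.symm hk)]; exact ih
        · rw [if_neg hlt]; exact ih

lemma pvOfList_append_singleton {α : Type} [BEq α] (xs : List α) (x : α) :
    PySem.Set.ofList (xs ++ [x]) = PySem.Set.add (PySem.Set.ofList xs) x := by
  rw [PySem.Set.ofList_eq_foldl, PySem.Set.ofList_eq_foldl, List.foldl_append,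
      List.foldl_cons, List.foldl_nil]

lemma pvDict_keys (lt : Int → Int → Prop) [DecidableRel lt] (key val : Int × Int → Int)
    (l : List (Int × Int)) :
    (pvDictB lt key val l).keys = PySem.Set.ofList (l.map key) := by
  rw [pvDictB]
  induction l using List.reverseRecOn with
  | nil => rfl
  | append_singleton l q ih =>
    rw [List.foldl_append, List.foldl_cons, List.foldl_nil, List.map_append,
        List.map_cons, List.map_nil, pvOfList_append_singleton]
    set D := List.foldl (fun (d : PySem.Dict Int (Int × Int)) p =>
      match d.get? (key p) with
      | none => d.insert (key p) p
      | some r => if lt (val p) (val r) then d.insert (key p) p else d) PySem.Dict.empty l with hD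
    cases hg : D.get? (key q) with
    | none =>
      have hc : D.contains (key q) = false := by
        rw [PySem.Dict.contains_eq_isSome_get?, hg]; rfl
      dsimp only
      rw [PySem.Dict.keys_insert_of_not_contains _ _ hc, ih]
      have hmem : key q ∉ PySem.Set.ofList (l.map key) := by
        intro hmm
        have h2 : D.contains (key q) = true := by
          rw [PySem.Dict.contains_iff_mem_keys, ih]; exact hmm
        rw [hc] at h2; exact Bool.noConfusion h2
      simp [PySem.Set.add, hmem]
    | some r =>
      have hc : D.contains (key q) = true := by
        rw [PySem.Dict.contains_eq_isSome_get?, hg]; rfl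
      have hmem : key q ∈ PySem.Set.ofList (l.map key) := by
        rw [← ih, ← PySem.Dict.contains_iff_mem_keys]; exact hc
      dsimp only
      by_cases hlt : lt (val q) (val r)
      · rw [if_pos hlt, PySem.Dict.keys_insert_of_contains _ _ hc, ih]
        simp [PySem.Set.add, hmem]
      · rw [if_neg hlt, ih]
        simp [PySem.Set.add, hmem]

lemma pvDict_values (lt : Int → Int → Prop) [DecidableRel lt] (key val : Int × Int → Int)
    (l : List (Int × Int)) :
    (pvDictB lt key val l).values
      = (PySem.Set.ofList (l.map key)).map (fun y => (pvBest lt key val l y).getD (0, 0)) := by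
  rw [PySem.Dict.values_eq_map_keys _ (by rw [pvDict_keys]; exact PySem.Set.nodup_ofList _) ((0 : Int), (0 : Int))]
  rw [pvDict_keys]
  exact List.map_congr_left (fun y _ => by
    rw [PySem.Dict.getD_eq_get?_getD, pvDict_get?])

lemma pvBest_key (lt : Int → Int → Prop) [DecidableRel lt] (key val : Int × Int → Int)
    (l : List (Int × Int)) (y : Int) :
    ∀ r, pvBest lt key val l y = some r → key r = y := by
  rw [pvBest]
  induction l using List.reverseRecOn with
  | nil => intro r h; exact absurd h (by simp)
  | append_singleton l q ih =>
    intro r h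
    rw [List.foldl_append, List.foldl_cons, List.foldl_nil] at h
    by_cases hk : key q = y
    · rw [if_pos (by simp [hk])] at h
      cases hg : List.foldl _ none l with
      | none => rw [hg] at h; simp [pvUpd] at h; rw [← h]; exact hk
      | some b =>
        rw [hg] at h
        simp only [pvUpd] at h
        split_ifs at h with hlt
        · rw [← Option.some_inj.mp h]; exact hk
        · exact ih r (hg.trans h)
    · rw [if_neg (by simp [hk])] at h
      exact ih r h

lemma pvBest_isSome (lt : Int → Int → Prop) [DecidableRel lt] (key val : Int × Int → Int)
    (l : List (Int × Int)) (y : Int) (h : y ∈ l.map key) :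
    (pvBest lt key val l y).isSome := by
  rw [pvBest]
  induction l using List.reverseRecOn with
  | nil => simp at h
  | append_singleton l q ih =>
    rw [List.foldl_append, List.foldl_cons, List.foldl_nil]
    by_cases hk : key q = y
    · rw [if_pos (by simp [hk])]
      cases List.foldl _ none l with
      | none => rfl
      | some b => simp only [pvUpd]; split_ifs <;> rfl
    · rw [List.map_append, List.mem_append] at h
      rcases h with h | h
      · rw [if_neg (by simp [hk])]; exact ih h
      · simp at h; exact absurd h.symm hk

lemma pvSetMap (f : Int → Int × Int) (kf : Int × Int → Int) (l : List Int)
    (h : ∀ y ∈ l, kf (f y) = y) :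
    PySem.Set.ofList (l.map f) = (PySem.Set.ofList l).map f := by
  induction l using List.reverseRecOn with
  | nil => rfl
  | append_singleton l y ih =>
    have h' : ∀ z ∈ l, kf (f z) = z := fun z hz => h z (by simp [hz])
    rw [List.map_append, List.map_cons, List.map_nil, pvOfList_append_singleton,
        pvOfList_append_singleton, ih h']
    by_cases hm : y ∈ PySem.Set.ofList l
    · have hm' : f y ∈ (PySem.Set.ofList l).map f := List.mem_map_of_mem hm
      simp [PySem.Set.add, hm, hm']
    · have hm' : f y ∉ (PySem.Set.ofList l).map f := by
        intro hc
        rcases List.mem_map.mp hc with ⟨z, hz, hzf⟩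
        have hz' : z ∈ l := (PySem.Set.mem_ofList l z).mp hz
        have : z = y := by
          have := h' z hz'
          rw [hzf] at this
          rw [← this, h y (by simp)]
        exact hm (this ▸ hz)
      simp [PySem.Set.add, hm, hm', List.map_append]

-- the main per-component identity: A's deduplicated representative list
-- equals the values of B's dictionary
lemma pvMain (lt : Int → Int → Prop) [DecidableRel lt] (key val : Int × Int → Int)
    (hirr : ∀ a, ¬ lt a a) (htr : ∀ a b c, ¬ lt a c → lt b c → ¬ lt a b)
    (l : List (Int × Int)) :
    PySem.Set.ofList (l.map (fun point =>
      ((l.filter (fun p => key p == key point)).filter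
          (fun p => some (val p) ==
            (l.filter (fun p => key p == key point)).foldl (pvMinStep lt val) none)).headD (0, 0)))
      = (pvDictB lt key val l).values := by
  rw [pvDict_values]
  have hfun : (l.map (fun point =>
      ((l.filter (fun p => key p == key point)).filter
          (fun p => some (val p) ==
            (l.filter (fun p => key p == key point)).foldl (pvMinStep lt val) none)).headD (0, 0)))
      = (l.map key).map (fun y => (pvBest lt key val l y).getD (0, 0)) := by
    rw [List.map_map]
    exact List.map_congr_left (fun point _ => pvRow lt key val hirr htr l (key point))
  rw [hfun]
  exact pvSetMap _ key (l.map key) (fun y hy => by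
    obtain ⟨r, hr⟩ := Option.isSome_iff_exists.mp (pvBest_isSome lt key val l y hy)
    rw [hr]
    exact pvBest_key lt key val l y r hr)

lemma pv_lt_irr : ∀ a : Int, ¬ a < a := fun a => lt_irrefl a
lemma pv_lt_tr : ∀ a b c : Int, ¬ a < c → b < c → ¬ a < b := by intro a b c h1 h2 h3; omega
lemma pv_gt_irr : ∀ a : Int, ¬ a > a := fun a => lt_irrefl a
lemma pv_gt_tr : ∀ a b c : Int, ¬ a > c → b > c → ¬ a > b := by intro a b c h1 h2 h3; omega

lemma pv_main_eq (points : List (Int × Int)) :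
    find_extreme_points points = find_extreme_points_alt points := by
  by_cases hnil : points = []
  · subst hnil; rfl
  · rw [find_extreme_points, find_extreme_points_alt]
    simp only [if_neg hnil]
    have hmm1 : ∀ (row : List (Int × Int)),
        row.foldl (fun (s : Option Int × Option Int) rp =>
          (match s.1 with | none => some rp.1 | some m => if rp.1 < m then some rp.1 else some m,
           match s.2 with | none => some rp.1 | some m => if rp.1 > m then some rp.1 else some m))
          (none, none)
        = (row.foldl (fun o rp => match o with
            | none => some rp.1 | some m => if rp.1 < m then some rp.1 else some m) none,
           row.foldl (fun o rp => match o with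
            | none => some rp.1 | some m => if rp.1 > m then some rp.1 else some m) none) :=
      fun row => PySem.List.foldl_prod_mk
        (fun o (rp : Int × Int) => match o with
          | none => some rp.1 | some m => if rp.1 < m then some rp.1 else some m)
        (fun o (rp : Int × Int) => match o with
          | none => some rp.1 | some m => if rp.1 > m then some rp.1 else some m) row none none
    have hmm2 : ∀ (col : List (Int × Int)),
        col.foldl (fun (s : Option Int × Option Int) cp =>
          (match s.1 with | none => some cp.2 | some m => if cp.2 < m then some cp.2 else some m,
           match s.2 with | none => some cp.2 | some m => if cp.2 > m then some cp.2 else some m))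
          (none, none)
        = (col.foldl (fun o cp => match o with
            | none => some cp.2 | some m => if cp.2 < m then some cp.2 else some m) none,
           col.foldl (fun o cp => match o with
            | none => some cp.2 | some m => if cp.2 > m then some cp.2 else some m) none) :=
      fun col => PySem.List.foldl_prod_mk
        (fun o (cp : Int × Int) => match o with
          | none => some cp.2 | some m => if cp.2 < m then some cp.2 else some m)
        (fun o (cp : Int × Int) => match o with
          | none => some cp.2 | some m => if cp.2 > m then some cp.2 else some m) col none none
    simp only [hmm1, hmm2]
    have hsplit : ∀ (h1 h2 : (Int × Int) → (Int × Int)),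
        points.foldl (fun (acc : List (Int × Int) × List (Int × Int)) point =>
          (acc.1 ++ [h1 point], acc.2 ++ [h2 point])) ([], [])
          = (points.map h1, points.map h2) := by
      intro h1 h2
      rw [PySem.List.foldl_prod_mk (fun a x => a ++ [h1 x]) (fun a x => a ++ [h2 x]) points [] [],
          PySem.List.foldl_append_singleton_eq_map, PySem.List.foldl_append_singleton_eq_map,
          List.nil_append, List.nil_append]
    have hsplit4 : ∀ (pts : List (Int × Int)) (d1 d2 d3 d4 : PySem.Dict Int (Int × Int)),
        pts.foldl (fun (ds : PySem.Dict Int (Int × Int) × PySem.Dict Int (Int × Int) ×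
                          PySem.Dict Int (Int × Int) × PySem.Dict Int (Int × Int)) p =>
          (match ds.1.get? p.2 with
           | none => ds.1.insert p.2 p
           | some r => if p.1 < r.1 then ds.1.insert p.2 p else ds.1,
           match ds.2.1.get? p.2 with
           | none => ds.2.1.insert p.2 p
           | some r => if p.1 > r.1 then ds.2.1.insert p.2 p else ds.2.1,
           match ds.2.2.1.get? p.1 with
           | none => ds.2.2.1.insert p.1 p
           | some r => if p.2 < r.2 then ds.2.2.1.insert p.1 p else ds.2.2.1,
           match ds.2.2.2.get? p.1 with
           | none => ds.2.2.2.insert p.1 p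
           | some r => if p.2 > r.2 then ds.2.2.2.insert p.1 p else ds.2.2.2)) (d1, d2, d3, d4)
          = (pts.foldl (fun d p => match d.get? p.2 with
               | none => d.insert p.2 p
               | some r => if p.1 < r.1 then d.insert p.2 p else d) d1,
             pts.foldl (fun d p => match d.get? p.2 with
               | none => d.insert p.2 p
               | some r => if p.1 > r.1 then d.insert p.2 p else d) d2,
             pts.foldl (fun d p => match d.get? p.1 with
               | none => d.insert p.1 p
               | some r => if p.2 < r.2 then d.insert p.1 p else d) d3,
             pts.foldl (fun d p => match d.get? p.1 with
               | none => d.insert p.1 p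
               | some r => if p.2 > r.2 then d.insert p.1 p else d) d4) := by
      intro pts
      induction pts with
      | nil => intro d1 d2 d3 d4; rfl
      | cons p t ih =>
        intro d1 d2 d3 d4
        simp only [List.foldl_cons]
        exact ih _ _ _ _
    rw [hsplit, hsplit, hsplit4]
    refine congrArg₂ Prod.mk ?_ (congrArg₂ Prod.mk ?_ (congrArg₂ Prod.mk ?_ ?_))
    · exact congrArg (fun t => PySem.List.sorted t (fun p => p.2) false)
        (pvMain (· < ·) (fun p => p.2) (fun p => p.1) pv_lt_irr pv_lt_tr points)
    · exact congrArg (fun t => PySem.List.sorted t (fun p => p.2) false)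
        (pvMain (· > ·) (fun p => p.2) (fun p => p.1) pv_gt_irr pv_gt_tr points)
    · exact congrArg (fun t => PySem.List.sorted t (fun p => p.1) false)
        (pvMain (· < ·) (fun p => p.1) (fun p => p.2) pv_lt_irr pv_lt_tr points)
    · exact congrArg (fun t => PySem.List.sorted t (fun p => p.1) false)
        (pvMain (· > ·) (fun p => p.1) (fun p => p.2) pv_gt_irr pv_gt_tr points)

-- ===== VERDICT (by name: the statement is the Claim_ definition above) =====
theorem find_extreme_points_spec : Claim_equal_find_extreme_points := by
  intro points _
  exact pv_main_eq points
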